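-- pv_equiv track=rewrite | github.com/cxl-for-anonymous/DIGEST | dialog_summary.py | merge_consecutive_singles
-- ===== SOURCE A (Python) =====
-- def merge_consecutive_singles(list_of_lists):
--     result = []
--     temp_single_group = []
--     for sublst in list_of_lists:
--         if len(sublst) == 1:
--             val = sublst[0]
--             if not temp_single_group:
--                 temp_single_group.append(val)
--             else:
--                 if val == temp_single_group[-1] + 1:
--                     temp_single_group.append(val)
--                 else:
--                     result.append(temp_single_group)
--                     temp_single_group = [val]
--         else:
--             if temp_single_group:
--                 result.append(temp_single_group)
--                 temp_single_group = []
--             result.append(sublst)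
--     if temp_single_group:
--         result.append(temp_single_group)
--     return result
-- ===== SOURCE B (Python) =====
-- def _split_runs(vals):
--     # vals is a non-empty list of ints; split into maximal runs where each
--     # value equals the previous value plus 1
--     k = 1
--     while k < len(vals) and vals[k] == vals[k - 1] + 1:
--         k += 1
--     head = vals[:k]
--     return [head] if k == len(vals) else [head] + _split_runs(vals[k:])
--
--
-- def merge_consecutive_singles(list_of_lists):
--     result = []
--     i = 0
--     n = len(list_of_lists)
--     while i < n:
--         sub = list_of_lists[i]
--         if len(sub) != 1:
--             result.append(sub)
--             i += 1
--         else: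
--             j = i
--             while j < n and len(list_of_lists[j]) == 1:
--                 j += 1
--             result.extend(_split_runs([s[0] for s in list_of_lists[i:j]]))
--             i = j
--     return result
-- ===== Notes on version B (the rewrite author's own statement) =====
-- stated objective: alternative
-- what changed: B first segments the input into maximal runs of singleton sublists, then splits each run's value sequence into maximal +1-consecutive chunks by comparing adjacent values (vals[k] == vals[k-1]+1) with recursion, instead of A's single stateful pass with a pending-group accumulator flushed at each break.
import Mathlib
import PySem

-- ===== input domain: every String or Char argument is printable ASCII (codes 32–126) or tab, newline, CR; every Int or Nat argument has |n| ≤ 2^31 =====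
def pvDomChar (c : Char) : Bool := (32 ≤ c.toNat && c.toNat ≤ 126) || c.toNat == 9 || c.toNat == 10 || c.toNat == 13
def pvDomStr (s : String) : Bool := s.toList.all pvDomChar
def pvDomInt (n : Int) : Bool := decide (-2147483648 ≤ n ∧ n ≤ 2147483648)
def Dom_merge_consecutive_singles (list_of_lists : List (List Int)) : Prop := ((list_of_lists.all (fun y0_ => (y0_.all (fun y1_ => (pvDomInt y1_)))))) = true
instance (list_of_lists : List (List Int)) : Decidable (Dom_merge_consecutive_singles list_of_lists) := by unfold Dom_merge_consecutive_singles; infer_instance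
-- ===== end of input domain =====

-- B segments the input into maximal runs of singleton sublists and splits each
-- run's values by adjacent-value comparison, instead of A's single stateful
-- pass with a pending-group accumulator; objective: alternative decomposition.

-- ===== PORT A =====
def mcsStepA (st : List (List Int) × List Int) (sublst : List Int) :
    List (List Int) × List Int :=
  let result := st.1
  let temp_single_group := st.2
  if sublst.length = 1 then
    let val := (PySem.List.pyGet? sublst 0).getD 0
    if temp_single_group = [] then
      (result, temp_single_group ++ [val])
    else
      if val = (PySem.List.pyGet? temp_single_group (-1)).getD 0 + 1 then
        (result, temp_single_group ++ [val])
      else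
        (result ++ [temp_single_group], [val])
  else
    if temp_single_group ≠ [] then
      (result ++ [temp_single_group] ++ [sublst], [])
    else
      (result ++ [sublst], [])

def merge_consecutive_singles (list_of_lists : List (List Int)) : List (List Int) :=
  let st := list_of_lists.foldl mcsStepA ([], [])
  if st.2 ≠ [] then st.1 ++ [st.2] else st.1

-- ===== PORT B =====
-- k = length of the leading while-scan 'vals[k] == vals[k-1] + 1' (prev = vals[k-1])
def mcsRunLen (prev : Int) : List Int → Nat
  | [] => 0
  | v :: vs => if v = prev + 1 then 1 + mcsRunLen v vs else 0

def mcsSplitRuns (vals : List Int) : List (List Int) :=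
  match vals with
  | [] => []
  | v :: vs =>
    let k := 1 + mcsRunLen v vs
    let head := (v :: vs).take k
    if k = (v :: vs).length then [head] else head :: mcsSplitRuns ((v :: vs).drop k)
termination_by vals.length
decreasing_by simp

def merge_consecutive_singles_alt (list_of_lists : List (List Int)) : List (List Int) :=
  match list_of_lists with
  | [] => []
  | sub :: rest =>
    if sub.length = 1 then
      mcsSplitRuns (((sub :: rest).takeWhile (fun s => s.length == 1)).map
          (fun s => (PySem.List.pyGet? s 0).getD 0))
        ++ merge_consecutive_singles_alt (rest.dropWhile (fun s => s.length == 1))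
    else
      sub :: merge_consecutive_singles_alt rest
termination_by list_of_lists.length
decreasing_by
  · have := List.length_dropWhile_le (fun s : List Int => s.length == 1) rest
    simp; omega
  · simp

-- ===== PRECONDITION & SPEC =====
def Spec_merge_consecutive_singles (list_of_lists : List (List Int)) (out : List (List Int)) : Prop := out = merge_consecutive_singles_alt list_of_lists
instance (list_of_lists : List (List Int)) (out : List (List Int)) : Decidable (Spec_merge_consecutive_singles list_of_lists out) := by unfold Spec_merge_consecutive_singles; infer_instance

-- ===== CLAIM (what is proved, stated in full; the proofs are below) =====
def Claim_equal_merge_consecutive_singles : Prop := ∀ (list_of_lists : List (List Int)), Dom_merge_consecutive_singles list_of_lists → Spec_merge_consecutive_singles list_of_lists (merge_consecutive_singles list_of_lists)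

-- ===== LEMMAS AND PROOFS =====

def mcsVal (s : List Int) : Int := (PySem.List.pyGet? s 0).getD 0
def mcsLast (run : List Int) : Int := (PySem.List.pyGet? run (-1)).getD 0

-- the "pending run" form of the splitter
def contRuns (run : List Int) : List Int → List (List Int)
  | [] => [run]
  | v :: vs =>
    if v = mcsLast run + 1 then contRuns (run ++ [v]) vs
    else run :: contRuns [v] vs

-- B's value when a nonempty singleton run 'run' is pending before input l
def altCont (run : List Int) : List (List Int) → List (List Int)
  | [] => [run]
  | sub :: rest =>
    if sub.length = 1 then
      (if mcsVal sub = mcsLast run + 1 then altCont (run ++ [mcsVal sub]) rest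
       else run :: altCont [mcsVal sub] rest)
    else run :: sub :: merge_consecutive_singles_alt rest

def altK (run : List Int) (l : List (List Int)) : List (List Int) :=
  match run with
  | [] => merge_consecutive_singles_alt l
  | _ :: _ => altCont run l

theorem mcsLast_append_single (run : List Int) (v : Int) : mcsLast (run ++ [v]) = v := by
  simp [mcsLast, PySem.List.pyGet?_neg_one_append_singleton]

theorem mcsLast_single (v : Int) : mcsLast [v] = v := by
  simp [mcsLast, PySem.List.pyGet?_neg_one]

theorem mcsRunLen_le (prev : Int) (vs : List Int) : mcsRunLen prev vs ≤ vs.length := by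
  induction vs generalizing prev with
  | nil => simp [mcsRunLen]
  | cons v vs ih =>
    simp only [mcsRunLen]
    split
    · have := ih v; simp; omega
    · simp

theorem mcsSplitRuns_nil : mcsSplitRuns [] = [] := by
  rw [mcsSplitRuns.eq_def]

theorem mcsSplitRuns_cons_eq (v : Int) (vs : List Int) :
    mcsSplitRuns (v :: vs) =
      if 1 + mcsRunLen v vs = vs.length + 1 then [(v :: vs).take (1 + mcsRunLen v vs)]
      else (v :: vs).take (1 + mcsRunLen v vs) :: mcsSplitRuns ((v :: vs).drop (1 + mcsRunLen v vs)) := by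
  rw [mcsSplitRuns.eq_def]
  simp

theorem contRuns_eq (vs run : List Int) :
    contRuns run vs =
      (run ++ vs.take (mcsRunLen (mcsLast run) vs)) ::
        mcsSplitRuns (vs.drop (mcsRunLen (mcsLast run) vs)) := by
  induction vs generalizing run with
  | nil => simp [contRuns, mcsRunLen, mcsSplitRuns_nil]
  | cons v vs ih =>
    simp only [contRuns, mcsRunLen]
    by_cases h : v = mcsLast run + 1
    · simp only [if_pos h, Nat.add_comm 1 (mcsRunLen v vs)]
      rw [ih (run ++ [v]), mcsLast_append_single]
      simp [List.take_succ_cons, List.drop_succ_cons]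
    · simp only [if_neg h, List.take_zero, List.drop_zero, List.append_nil]
      rw [ih [v], mcsLast_single, mcsSplitRuns_cons_eq, Nat.add_comm 1 (mcsRunLen v vs)]
      have hk := mcsRunLen_le v vs
      simp only [List.take_succ_cons, List.drop_succ_cons]
      by_cases he : mcsRunLen v vs + 1 = vs.length + 1
      · have hd : vs.drop (mcsRunLen v vs) = [] := by
          apply List.drop_eq_nil_of_le; omega
        simp [he, hd, mcsSplitRuns_nil]
      · simp only [if_neg he]
        simp

theorem mcsSplitRuns_cons (v : Int) (vs : List Int) :
    mcsSplitRuns (v :: vs) = contRuns [v] vs := by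
  rw [contRuns_eq, mcsLast_single, mcsSplitRuns_cons_eq, Nat.add_comm 1 (mcsRunLen v vs)]
  have hk := mcsRunLen_le v vs
  simp only [List.take_succ_cons, List.drop_succ_cons]
  by_cases he : mcsRunLen v vs + 1 = vs.length + 1
  · have hd : vs.drop (mcsRunLen v vs) = [] := by
      apply List.drop_eq_nil_of_le; omega
    simp [he, hd, mcsSplitRuns_nil]
  · simp only [if_neg he]
    simp

theorem alt_cons_nonsingleton (sub : List Int) (rest : List (List Int)) (h : ¬ sub.length = 1) :
    merge_consecutive_singles_alt (sub :: rest) = sub :: merge_consecutive_singles_alt rest := by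
  rw [merge_consecutive_singles_alt.eq_def]
  simp [h]

theorem altCont_eq (l : List (List Int)) (run : List Int) :
    altCont run l =
      contRuns run ((l.takeWhile (fun s => s.length == 1)).map mcsVal) ++
        merge_consecutive_singles_alt (l.dropWhile (fun s => s.length == 1)) := by
  induction l generalizing run with
  | nil => simp [altCont, contRuns, merge_consecutive_singles_alt]
  | cons sub rest ih =>
    simp only [List.takeWhile_cons, List.dropWhile_cons]
    by_cases h : sub.length = 1
    · have hb : (sub.length == 1) = true := by simpa using h
      simp only [hb, if_true, List.map_cons, contRuns]
      simp only [altCont, if_pos h]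
      by_cases hv : mcsVal sub = mcsLast run + 1
      · simp only [if_pos hv, ih]
      · simp only [if_neg hv, ih, List.cons_append]
    · have hb : (sub.length == 1) = false := by simpa using h
      simp only [hb, Bool.false_eq_true, if_false, List.map_nil, contRuns]
      simp only [altCont, if_neg h]
      rw [alt_cons_nonsingleton sub rest h]
      simp

theorem alt_cons_singleton (sub : List Int) (rest : List (List Int)) (h : sub.length = 1) :
    merge_consecutive_singles_alt (sub :: rest) = altCont [mcsVal sub] rest := by
  have hb : (sub.length == 1) = true := by simpa using h
  rw [merge_consecutive_singles_alt.eq_def]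
  simp only [if_pos h, List.takeWhile_cons, hb, if_true, List.map_cons]
  rw [mcsSplitRuns_cons, altCont_eq]
  rfl

theorem foldl_altK (l : List (List Int)) :
    ∀ (res : List (List Int)) (run : List Int),
      (fun st : List (List Int) × List Int =>
          if st.2 ≠ [] then st.1 ++ [st.2] else st.1)
        (l.foldl mcsStepA (res, run)) = res ++ altK run l := by
  induction l with
  | nil =>
    intro res run
    cases run with
    | nil => simp [altK, merge_consecutive_singles_alt]
    | cons r rs => simp [altK, altCont]
  | cons sub rest ih =>
    intro res run
    rw [List.foldl_cons]
    cases run with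
    | nil =>
      by_cases h : sub.length = 1
      · have : mcsStepA (res, []) sub = (res, [mcsVal sub]) := by
          simp [mcsStepA, h, mcsVal]
        rw [this, ih]
        simp [altK, alt_cons_singleton sub rest h]
      · have : mcsStepA (res, []) sub = (res ++ [sub], []) := by
          simp [mcsStepA, h]
        rw [this, ih]
        rw [altK, altK, merge_consecutive_singles_alt]
        simp [h]
    | cons r rs =>
      by_cases h : sub.length = 1
      · by_cases hv : mcsVal sub = mcsLast (r :: rs) + 1
        · have hstep : mcsStepA (res, r :: rs) sub = (res, (r :: rs) ++ [mcsVal sub]) := by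
            simp only [mcsVal, mcsLast] at hv
            simp only [mcsStepA, mcsVal]
            rw [if_pos h, if_neg (by simp), if_pos hv]
          rw [hstep, ih]
          simp [altK, altCont, h, hv]
        · have hstep : mcsStepA (res, r :: rs) sub = (res ++ [r :: rs], [mcsVal sub]) := by
            simp only [mcsVal, mcsLast] at hv
            simp only [mcsStepA, mcsVal]
            rw [if_pos h, if_neg (by simp), if_neg hv]
          rw [hstep, ih]
          simp [altK, altCont, h, hv]
      · have : mcsStepA (res, r :: rs) sub = (res ++ [r :: rs] ++ [sub], []) := by
          simp [mcsStepA, h]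
        rw [this, ih]
        simp [altK, altCont, h]

-- ===== VERDICT (by name: the statement is the Claim_ definition above) =====
theorem merge_consecutive_singles_spec : Claim_equal_merge_consecutive_singles := by
  intro l _
  show merge_consecutive_singles l = merge_consecutive_singles_alt l
  have := foldl_altK l [] []
  simpa [merge_consecutive_singles, altK] using this
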